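-- pv_equiv track=rewrite | github.com/Infinidrix/competitive-programming | Day 21/q3 presentation.py | min_time_finder
-- ===== SOURCE A (Python) =====
-- def min_time_finder(stack, to_be_sent):
-- 	max_travel = 0
-- 	time = 0
-- 	for i in range(len(to_be_sent)):
-- 		present = to_be_sent[i]
-- 		found_location = -1
-- 		for j in range(max_travel, len(stack)):
-- 			if stack[j] == present:
-- 				found_location = j
-- 				break
-- 		if found_location == -1:
-- 			time += 1
-- 		else:
-- 			max_travel = found_location
-- 			time += 2*(found_location - i) + 1
-- 	return time
-- ===== SOURCE B (Python) =====
-- def min_time_finder(stack, to_be_sent):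
--     # index each value -> increasing list of its positions in stack
--     positions = {}
--     for j, v in enumerate(stack):
--         positions.setdefault(v, []).append(j)
--     max_travel = 0
--     time = 0
--     for i, present in enumerate(to_be_sent):
--         pos = positions.get(present, [])
--         # binary search: first k with pos[k] >= max_travel
--         lo, hi = 0, len(pos)
--         while lo < hi:
--             mid = (lo + hi) // 2
--             if pos[mid] < max_travel:
--                 lo = mid + 1
--             else:
--                 hi = mid
--         if lo == len(pos):
--             time += 1
--         else:
--             j = pos[lo]
--             max_travel = j
--             time += 2 * (j - i) + 1
--     return time
-- ===== Notes on version B (the rewrite author's own statement) =====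
-- stated objective: faster
-- what changed: A rescans the stack linearly from max_travel for every present (O(n*m)); B builds a value-to-sorted-positions index once and binary-searches it for the first position >= max_travel, removing the inner scan.
import Mathlib
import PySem

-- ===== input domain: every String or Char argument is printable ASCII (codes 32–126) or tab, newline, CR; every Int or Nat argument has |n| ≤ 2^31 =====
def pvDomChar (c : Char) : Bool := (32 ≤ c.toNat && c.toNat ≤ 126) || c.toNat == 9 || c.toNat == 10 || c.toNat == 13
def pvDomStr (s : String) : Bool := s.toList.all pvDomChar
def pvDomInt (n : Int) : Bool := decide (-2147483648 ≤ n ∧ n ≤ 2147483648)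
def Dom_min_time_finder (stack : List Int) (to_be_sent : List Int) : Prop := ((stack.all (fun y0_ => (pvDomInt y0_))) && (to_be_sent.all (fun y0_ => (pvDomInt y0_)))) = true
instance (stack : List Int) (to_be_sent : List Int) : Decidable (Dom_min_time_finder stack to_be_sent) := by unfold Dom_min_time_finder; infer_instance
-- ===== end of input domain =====

-- B replaces A's linear rescan of the stack per present by a value→positions index built once
-- plus a binary search per present (objective: faster).

-- ===== PORT A =====
-- inner loop 'for j in range(max_travel, len(stack)): if stack[j] == present: found_location = j; break'
-- (j is always a valid nonnegative index here, so pyGetD is exact)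
def mtfScan (stack : List Int) (present : Int) : List Int → Int
  | [] => -1
  | j :: js => if PySem.List.pyGetD stack j 0 = present then j else mtfScan stack present js

def min_time_finder (stack : List Int) (to_be_sent : List Int) : Int :=
  ((PySem.List.pyRange 0 (to_be_sent.length : Int) 1).foldl (fun st i =>
      let present := PySem.List.pyGetD to_be_sent i 0
      let found_location := mtfScan stack present (PySem.List.pyRange st.1 (stack.length : Int) 1)
      if found_location = -1 then (st.1, st.2 + 1)
      else (found_location, st.2 + 2 * (found_location - i) + 1)) ((0 : Int), (0 : Int))).2

-- ===== PORT B =====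
-- 'positions.setdefault(v, []).append(j)' over enumerate(stack)
def mtfBuild (stack : List Int) : PySem.Dict Int (List Int) :=
  (PySem.List.enumerate stack).foldl (fun d p => d.modify p.2 [] (· ++ [p.1])) PySem.Dict.empty

-- Source B's hand-written binary search: first k in [lo, hi) with pos[k] >= m
-- (mid is always a valid index here, so List.getD is exact)
def mtfBS (pos : List Int) (m : Int) (lo hi : Nat) : Nat :=
  if _h : lo < hi then
    let mid := (lo + hi) / 2
    if pos.getD mid 0 < m then mtfBS pos m (mid + 1) hi else mtfBS pos m lo mid
  else lo
termination_by hi - lo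
decreasing_by all_goals omega

def min_time_finder_alt (stack : List Int) (to_be_sent : List Int) : Int :=
  let positions := mtfBuild stack
  ((PySem.List.enumerate to_be_sent).foldl (fun st p =>
      let pos := (positions.get? p.2).getD []
      let lo := mtfBS pos st.1 0 pos.length
      if lo = pos.length then (st.1, st.2 + 1)
      else
        let j := pos.getD lo 0
        (j, st.2 + 2 * (j - p.1) + 1)) ((0 : Int), (0 : Int))).2

-- ===== PRECONDITION & SPEC =====
def Spec_min_time_finder (stack : List Int) (to_be_sent : List Int) (out : Int) : Prop := out = min_time_finder_alt stack to_be_sent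
instance (stack : List Int) (to_be_sent : List Int) (out : Int) : Decidable (Spec_min_time_finder stack to_be_sent out) := by unfold Spec_min_time_finder; infer_instance

-- ===== CLAIM (what is proved, stated in full; the proofs are below) =====
def Claim_equal_min_time_finder : Prop := ∀ (stack : List Int) (to_be_sent : List Int), Dom_min_time_finder stack to_be_sent → Spec_min_time_finder stack to_be_sent (min_time_finder stack to_be_sent)

-- ===== LEMMAS AND PROOFS =====

-- the list of positions of v in stack, in increasing order
def posList (stack : List Int) (v : Int) : List Int :=
  ((PySem.List.enumerate stack).filter (fun p => p.2 == v)).map (·.1)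

lemma mtfBuild_getD (stack : List Int) (v : Int) :
    ((mtfBuild stack).get? v).getD [] = posList stack v := by
  rw [← PySem.Dict.getD_eq_get?_getD]
  unfold mtfBuild posList
  have : (PySem.List.enumerate stack).foldl (fun d p => d.modify p.2 [] (· ++ [p.1])) PySem.Dict.empty
      = ((PySem.List.enumerate stack).map Prod.swap).foldl (fun d p => d.modify p.1 [] (· ++ [p.2])) PySem.Dict.empty := by
    rw [List.foldl_map]; rfl
  rw [this, PySem.Dict.getD_foldl_modify_append]
  simp [List.filter_map, List.map_map, Function.comp_def, Prod.swap]

lemma posList_pairwise (stack : List Int) (v : Int) : (posList stack v).Pairwise (· < ·) := by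
  unfold posList
  refine List.Pairwise.map _ (fun a b h => h) ?_
  exact (PySem.List.pairwise_lt_enumerate stack 0).filter _

lemma mem_posList (stack : List Int) (v : Int) (j : Int) :
    j ∈ posList stack v ↔ ∃ (k : Nat) (h : k < stack.length), j = (k : Int) ∧ stack[k] = v := by
  unfold posList
  simp only [List.mem_map, List.mem_filter, PySem.List.mem_enumerate_iff]
  constructor
  · rintro ⟨p, ⟨⟨k, hk, rfl⟩, hv⟩, rfl⟩
    exact ⟨k, hk, by simpa using hv⟩
  · rintro ⟨k, hk, rfl, hv⟩
    exact ⟨((k : Int), stack[k]), ⟨⟨k, hk, by simp⟩, by simpa using hv⟩, rfl⟩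

-- the length of the (< m)-prefix of a sorted list classifies its elements below m
lemma takeWhile_lt_spec (pos : List Int) (hs : pos.Pairwise (· ≤ ·)) (m : Int) (k : Nat)
    (hk : k < pos.length) :
    pos[k] < m ↔ k < (pos.takeWhile (fun x => decide (x < m))).length := by
  induction pos generalizing k with
  | nil => simp at hk
  | cons a t ih =>
    rcases List.pairwise_cons.mp hs with ⟨ha, ht⟩
    by_cases hA : a < m
    · rw [List.takeWhile_cons_of_pos (by simpa using hA)]
      cases k with
      | zero => simpa using hA
      | succ n =>
        simp only [List.getElem_cons_succ, List.length_cons]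
        rw [ih ht n (by simpa using hk)]
        omega
    · rw [List.takeWhile_cons_of_neg (by simpa using hA)]
      simp only [List.length_nil]
      cases k with
      | zero => simpa using hA
      | succ n =>
        simp only [List.getElem_cons_succ]
        constructor
        · intro h
          have hn : n < t.length := by simpa using hk
          have := ha (t[n]) (List.getElem_mem hn)
          omega
        · omega

lemma mtfBS_eq (pos : List Int) (hs : pos.Pairwise (· ≤ ·)) (m : Int) (lo hi : Nat)
    (hlo : lo ≤ (pos.takeWhile (fun x => decide (x < m))).length)
    (hhi : (pos.takeWhile (fun x => decide (x < m))).length ≤ hi)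
    (hlen : hi ≤ pos.length) :
    mtfBS pos m lo hi = (pos.takeWhile (fun x => decide (x < m))).length := by
  fun_induction mtfBS pos m lo hi with
  | case1 lo hi h mid hlt ih =>
    refine ih ?_ hhi hlen
    have hmid : mid < pos.length := by simp only [mid] at *; omega
    have : pos.getD mid 0 = pos[mid] := List.getD_eq_getElem _ _ hmid
    rw [this] at hlt
    have := (takeWhile_lt_spec pos hs m mid hmid).mp hlt
    omega
  | case2 lo hi h mid hlt ih =>
    refine ih hlo ?_ (by simp only [mid] at *; omega)
    have hmid : mid < pos.length := by simp only [mid] at *; omega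
    have : pos.getD mid 0 = pos[mid] := List.getD_eq_getElem _ _ hmid
    rw [this] at hlt
    by_contra hc
    have : mid < (pos.takeWhile (fun x => decide (x < m))).length := by omega
    exact hlt ((takeWhile_lt_spec pos hs m mid hmid).mpr this)
  | case3 lo hi h => omega

-- find? on a strictly sorted list returns the minimum satisfying element
lemma find?_sorted_iff (l : List Int) (hl : l.Pairwise (· < ·)) (P : Int → Bool) (j : Int) :
    l.find? P = some j ↔ (j ∈ l ∧ P j = true ∧ ∀ k ∈ l, P k = true → j ≤ k) := by
  induction l with
  | nil => simp
  | cons a t ih =>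
    rcases List.pairwise_cons.mp hl with ⟨ha, ht⟩
    by_cases hP : P a = true
    · simp only [List.find?_cons, hP]
      constructor
      · rintro h; cases h
        refine ⟨by simp, hP, ?_⟩
        intro k hk _
        rcases List.mem_cons.mp hk with rfl | hk
        · exact le_refl _
        · exact le_of_lt (ha k hk)
      · rintro ⟨hmem, hPj, hmin⟩
        have := hmin a (by simp) hP
        rcases List.mem_cons.mp hmem with rfl | hmem
        · rfl
        · exact absurd (ha j hmem) (by omega)
    · simp only [List.find?_cons, hP]
      rw [ih ht]
      constructor
      · rintro ⟨hmem, hPj, hmin⟩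
        exact ⟨List.mem_cons_of_mem _ hmem, hPj, fun k hk hkP => by
          rcases List.mem_cons.mp hk with rfl | hk
          · exact absurd hkP (by simp [hP])
          · exact hmin k hk hkP⟩
      · rintro ⟨hmem, hPj, hmin⟩
        rcases List.mem_cons.mp hmem with rfl | hmem
        · exact absurd hPj (by simp [hP])
        · exact ⟨hmem, hPj, fun k hk hkP => hmin k (List.mem_cons_of_mem _ hk) hkP⟩

lemma mtfScan_eq_find? (stack : List Int) (present : Int) (l : List Int) :
    mtfScan stack present l
      = ((l.find? (fun j => decide (PySem.List.pyGetD stack j 0 = present))).getD (-1)) := by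
  induction l with
  | nil => rfl
  | cons j js ih =>
    simp only [mtfScan, List.find?_cons]
    by_cases h : PySem.List.pyGetD stack j 0 = present
    · simp [h]
    · simp [h, ih]

-- per-present step: A's linear rescan from max_travel agrees with B's index + binary search
lemma step_eq (stack : List Int) (mt : Int) (hmt : 0 ≤ mt) (present : Int) :
    (mtfScan stack present (PySem.List.pyRange mt (stack.length : Int) 1) = -1
        ↔ mtfBS (posList stack present) mt 0 (posList stack present).length
            = (posList stack present).length)
    ∧ (mtfScan stack present (PySem.List.pyRange mt (stack.length : Int) 1) ≠ -1
        → mtfScan stack present (PySem.List.pyRange mt (stack.length : Int) 1)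
            = (posList stack present).getD
                (mtfBS (posList stack present) mt 0 (posList stack present).length) 0
          ∧ mt ≤ mtfScan stack present (PySem.List.pyRange mt (stack.length : Int) 1)) := by
  set pos := posList stack present with hpos
  have hsorted : pos.Pairwise (· < ·) := posList_pairwise stack present
  have hle : pos.Pairwise (· ≤ ·) := hsorted.imp (fun h => le_of_lt h)
  set t := (pos.takeWhile (fun x => decide (x < mt))).length with ht
  have hbs : mtfBS pos mt 0 pos.length = t :=
    mtfBS_eq pos hle mt 0 pos.length (by omega) ((pos.takeWhile_sublist _).length_le) le_rfl
  have htle : t ≤ pos.length := (pos.takeWhile_sublist _).length_le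
  rw [mtfScan_eq_find?, hbs]
  -- the satisfying set of the range-scan is {j ∈ pos | mt ≤ j}
  have hset : ∀ j : Int, (j ∈ PySem.List.pyRange mt (stack.length : Int) 1
        ∧ PySem.List.pyGetD stack j 0 = present) ↔ (j ∈ pos ∧ mt ≤ j) := by
    intro j
    rw [PySem.List.mem_pyRange_one, hpos, mem_posList]
    constructor
    · rintro ⟨⟨h1, h2⟩, h3⟩
      have h0 : (0 : Int) ≤ j := le_trans hmt h1
      rw [PySem.List.pyGetD_eq_getElem stack 0 h0 h2] at h3
      exact ⟨⟨j.toNat, by omega, by omega, h3⟩, h1⟩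
    · rintro ⟨⟨k, hk, rfl, hv⟩, h1⟩
      refine ⟨⟨h1, by exact_mod_cast hk⟩, ?_⟩
      rw [PySem.List.pyGetD_eq_getElem stack 0 (by positivity) (by exact_mod_cast hk)]
      simpa using hv
  by_cases hcase : t = pos.length
  · -- no position ≥ mt: the scan finds nothing
    have hnone : (PySem.List.pyRange mt (stack.length : Int) 1).find?
        (fun j => decide (PySem.List.pyGetD stack j 0 = present)) = none := by
      rw [List.find?_eq_none]
      intro j hj
      simp only [decide_eq_true_eq]
      intro hP
      obtain ⟨hjp, hjge⟩ := (hset j).mp ⟨hj, hP⟩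
      obtain ⟨k, hk, hkj⟩ := List.mem_iff_getElem.mp hjp
      have : pos[k] < mt := (takeWhile_lt_spec pos hle mt k hk).mpr (by omega)
      omega
    simp [hnone, hcase]
  · -- pos[t] is the first position ≥ mt, and the scan finds exactly it
    have htlt : t < pos.length := by omega
    have hjge : mt ≤ pos[t] := by
      by_contra hc
      have := (takeWhile_lt_spec pos hle mt t htlt).mp (by omega)
      omega
    have hmono : ∀ (p q : Nat) (hq : q < pos.length) (hpq : p ≤ q), pos[p]'(by omega) ≤ pos[q] := by
      intro p q hq hpq
      rcases Nat.lt_or_ge p q with h | h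
      · exact le_of_lt ((List.pairwise_iff_getElem.mp hsorted) p q (by omega) hq h)
      · have : p = q := by omega
        subst this; exact le_rfl
    have hfind : (PySem.List.pyRange mt (stack.length : Int) 1).find?
        (fun j => decide (PySem.List.pyGetD stack j 0 = present)) = some (pos[t]) := by
      rw [find?_sorted_iff _ (PySem.List.pairwise_lt_pyRange_one mt _) _ _]
      have hmem : pos[t] ∈ pos := List.getElem_mem htlt
      refine ⟨((hset _).mpr ⟨hmem, hjge⟩).1, by simpa using ((hset _).mpr ⟨hmem, hjge⟩).2, ?_⟩
      intro k hk hkP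
      simp only [decide_eq_true_eq] at hkP
      obtain ⟨hkp, hkge⟩ := (hset k).mp ⟨hk, hkP⟩
      obtain ⟨k', hk', hkk'⟩ := List.mem_iff_getElem.mp hkp
      have htk' : t ≤ k' := by
        by_contra hc
        have : pos[k'] < mt := (takeWhile_lt_spec pos hle mt k' hk').mpr (by omega)
        omega
      have := hmono t k' hk' htk'
      omega
    rw [hfind]
    have hne : pos[t] ≠ -1 := by omega
    simp only [Option.getD_some]
    refine ⟨⟨fun h => absurd h hne, fun h => absurd h (by omega)⟩, fun _ => ⟨?_, hjge⟩⟩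
    rw [List.getD_eq_getElem pos 0 htlt]

-- fold congruence with the invariant 0 ≤ max_travel
lemma fold_eq (stack to_be_sent : List Int) :
    ∀ (l : List Int) (st : Int × Int), 0 ≤ st.1 →
      l.foldl (fun st i =>
        let present := PySem.List.pyGetD to_be_sent i 0
        let found_location := mtfScan stack present (PySem.List.pyRange st.1 (stack.length : Int) 1)
        if found_location = -1 then (st.1, st.2 + 1)
        else (found_location, st.2 + 2 * (found_location - i) + 1)) st
      = l.foldl (fun st i =>
        let p : Int × Int := (i, PySem.List.pyGetD to_be_sent i 0)
        let pos := ((mtfBuild stack).get? p.2).getD []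
        let lo := mtfBS pos st.1 0 pos.length
        if lo = pos.length then (st.1, st.2 + 1)
        else
          let j := pos.getD lo 0
          (j, st.2 + 2 * (j - p.1) + 1)) st := by
  intro l
  induction l with
  | nil => intro st h; rfl
  | cons i rest ih =>
    intro st hst
    simp only [List.foldl_cons]
    set present := PySem.List.pyGetD to_be_sent i 0 with hpresent
    obtain ⟨hiff, hval⟩ := step_eq stack st.1 hst present
    rw [mtfBuild_getD]
    set fl := mtfScan stack present (PySem.List.pyRange st.1 (stack.length : Int) 1) with hfl
    set pos := posList stack present with hpos
    set lo := mtfBS pos st.1 0 pos.length with hlo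
    by_cases hc : fl = -1
    · rw [if_pos hc, if_pos (hiff.mp hc)]
      exact ih (st.1, st.2 + 1) hst
    · rw [if_neg hc, if_neg (fun h => hc (hiff.mpr h))]
      obtain ⟨hv, hge⟩ := hval hc
      rw [← hv]
      exact ih (fl, st.2 + 2 * (fl - i) + 1) (le_trans hst hge)

lemma main_eq (stack to_be_sent : List Int) :
    min_time_finder stack to_be_sent = min_time_finder_alt stack to_be_sent := by
  unfold min_time_finder min_time_finder_alt
  rw [PySem.List.enumerate_eq_map_pyRange to_be_sent 0]; simp only [List.foldl_map]
  exact congrArg Prod.snd (fold_eq stack to_be_sent _ ((0:Int),(0:Int)) le_rfl)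

-- ===== VERDICT (by name: the statement is the Claim_ definition above) =====
theorem min_time_finder_spec : Claim_equal_min_time_finder := by
  intro stack to_be_sent _
  exact main_eq stack to_be_sent
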